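-- pv_equiv track=rewrite | github.com/buguja/Progra-IO | Dinamica/Reemplazo.py | llenarMatriz
-- ===== SOURCE A (Python) =====
-- def llenarMatriz(inicial,lapso,remplazoI,remplazoF,ano,matriz):#llena el grafico
--     matriz[ano].append(inicial)
--     if(ano==lapso-1):
--         return matriz
--     if(inicial>remplazoF):
--         return llenarMatriz(1,lapso,remplazoI,remplazoF,ano+1,matriz)
--     if(remplazoI<=inicial<=remplazoF):
--         llenarMatriz(inicial+1,lapso,remplazoI,remplazoF,ano+1,matriz)
--         return llenarMatriz(1,lapso,remplazoI,remplazoF,ano+1,matriz)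
--     if(inicial<remplazoI):
--         return llenarMatriz(inicial+1,lapso,remplazoI,remplazoF,ano+1,matriz)
-- ===== SOURCE B (Python) =====
-- def llenarMatriz(inicial, lapso, remplazoI, remplazoF, ano, matriz):
--     # Iterative pre-order DFS with an explicit stack instead of recursion.
--     stack = [(inicial, ano)]
--     while stack:
--         val, a = stack.pop()
--         matriz[a].append(val)
--         if a == lapso - 1:
--             continue
--         if val > remplazoF:
--             stack.append((1, a + 1))
--         elif remplazoI <= val <= remplazoF:
--             stack.append((1, a + 1))
--             stack.append((val + 1, a + 1))
--         elif val < remplazoI: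
--             stack.append((val + 1, a + 1))
--     return matriz
-- ===== Notes on version B (the rewrite author's own statement) =====
-- stated objective: alternative
-- what changed: Replaced the branching recursion by an iterative pre-order DFS over an explicit stack of (value, year) frames, preserving the exact append order.
import Mathlib
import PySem

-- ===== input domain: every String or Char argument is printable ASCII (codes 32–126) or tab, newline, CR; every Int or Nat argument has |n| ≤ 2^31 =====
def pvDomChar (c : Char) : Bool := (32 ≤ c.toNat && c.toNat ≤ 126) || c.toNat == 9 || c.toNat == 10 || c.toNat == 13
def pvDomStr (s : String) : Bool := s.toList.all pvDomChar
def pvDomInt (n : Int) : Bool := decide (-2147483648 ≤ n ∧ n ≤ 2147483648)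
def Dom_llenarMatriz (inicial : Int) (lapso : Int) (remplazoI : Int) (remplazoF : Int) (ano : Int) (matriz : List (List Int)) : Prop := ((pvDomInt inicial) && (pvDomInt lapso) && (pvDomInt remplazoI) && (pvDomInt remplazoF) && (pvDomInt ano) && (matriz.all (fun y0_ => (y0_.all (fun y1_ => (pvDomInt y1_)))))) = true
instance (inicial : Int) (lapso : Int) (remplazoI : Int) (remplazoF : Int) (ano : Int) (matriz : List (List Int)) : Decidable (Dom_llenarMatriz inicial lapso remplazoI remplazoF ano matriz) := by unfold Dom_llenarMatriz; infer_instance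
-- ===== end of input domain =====

-- B replaces A's branching recursion by an iterative pre-order DFS over an explicit
-- stack of (value, year) frames; same append order, same return value (alternative
-- decomposition, no speed claim). Both Pythons mutate `matriz` in place identically;
-- the equivalence proved here is about the returned matrix value.


-- ===== PORT A =====
-- matriz[ano].append(inicial): Python-style negative-index resolution; out-of-range
-- (IndexError in Python) cannot occur inside Pre_, returns the list unchanged there.
def appendRow (m : List (List Int)) (i : Int) (x : Int) : List (List Int) :=
  let j : Int := if i < 0 then i + m.length else i
  if 0 ≤ j ∧ j < m.length then m.set j.toNat ((m.getD j.toNat []) ++ [x]) else m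

-- A's recursion, fueled (the Python recursion depth inside Pre_ is exactly (lapso - ano)).
def llenarFuelA (fuel : Nat) (inicial : Int) (lapso : Int) (remplazoI : Int)
    (remplazoF : Int) (ano : Int) (matriz : List (List Int)) : List (List Int) :=
  match fuel with
  | 0 => matriz
  | f + 1 =>
    let m1 := appendRow matriz ano inicial
    if ano = lapso - 1 then m1
    else if remplazoF < inicial then llenarFuelA f 1 lapso remplazoI remplazoF (ano + 1) m1
    else if remplazoI ≤ inicial ∧ inicial ≤ remplazoF then
      llenarFuelA f 1 lapso remplazoI remplazoF (ano + 1)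
        (llenarFuelA f (inicial + 1) lapso remplazoI remplazoF (ano + 1) m1)
    else if inicial < remplazoI then llenarFuelA f (inicial + 1) lapso remplazoI remplazoF (ano + 1) m1
    else m1  -- Python falls through all ifs (returns None); logically unreachable

def llenarMatriz (inicial : Int) (lapso : Int) (remplazoI : Int) (remplazoF : Int) (ano : Int) (matriz : List (List Int)) : List (List Int) :=
  llenarFuelA (lapso - ano).toNat inicial lapso remplazoI remplazoF ano matriz

-- ===== PORT B =====
-- B's while-loop over the explicit stack, fueled (one fuel unit per pop; inside Pre_
-- the number of pops is < 2 ^ ((lapso - ano) + 1)).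
def llenarLoop (lapso : Int) (remplazoI : Int) (remplazoF : Int) :
    Nat → List (Int × Int) → List (List Int) → List (List Int)
  | 0, _, m => m
  | _, [], m => m
  | f + 1, (val, a) :: rest, m =>
    let m1 := appendRow m a val
    if a = lapso - 1 then llenarLoop lapso remplazoI remplazoF f rest m1
    else if remplazoF < val then llenarLoop lapso remplazoI remplazoF f ((1, a + 1) :: rest) m1
    else if remplazoI ≤ val ∧ val ≤ remplazoF then
      llenarLoop lapso remplazoI remplazoF f ((val + 1, a + 1) :: (1, a + 1) :: rest) m1
    else if val < remplazoI then llenarLoop lapso remplazoI remplazoF f ((val + 1, a + 1) :: rest) m1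
    else llenarLoop lapso remplazoI remplazoF f rest m1

def llenarMatriz_alt (inicial : Int) (lapso : Int) (remplazoI : Int) (remplazoF : Int) (ano : Int) (matriz : List (List Int)) : List (List Int) :=
  llenarLoop lapso remplazoI remplazoF (2 ^ ((lapso - ano).toNat + 1)) [(inicial, ano)] matriz

-- ===== PRECONDITION & SPEC =====
-- Pre_ is exactly the set of inputs on which the Python A returns normally: every year
-- index visited (ano, ano+1, …, lapso-1) is a valid Python index of matriz. Outside it
-- A raises IndexError (and so does B).
def Pre_llenarMatriz (inicial : Int) (lapso : Int) (remplazoI : Int) (remplazoF : Int) (ano : Int) (matriz : List (List Int)) : Prop :=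
  -(matriz.length : Int) ≤ ano ∧ ano < lapso ∧ lapso ≤ (matriz.length : Int)

instance (inicial : Int) (lapso : Int) (remplazoI : Int) (remplazoF : Int) (ano : Int) (matriz : List (List Int)) : Decidable (Pre_llenarMatriz inicial lapso remplazoI remplazoF ano matriz) := by unfold Pre_llenarMatriz; infer_instance

def pvWitness_llenarMatriz : Int × Int × Int × Int × Int × List (List Int) :=
  (1, 3, 2, 2, 0, [[], [], []])

def Spec_llenarMatriz (inicial : Int) (lapso : Int) (remplazoI : Int) (remplazoF : Int) (ano : Int) (matriz : List (List Int)) (out : List (List Int)) : Prop := out = llenarMatriz_alt inicial lapso remplazoI remplazoF ano matriz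
instance (inicial : Int) (lapso : Int) (remplazoI : Int) (remplazoF : Int) (ano : Int) (matriz : List (List Int)) (out : List (List Int)) : Decidable (Spec_llenarMatriz inicial lapso remplazoI remplazoF ano matriz out) := by unfold Spec_llenarMatriz; infer_instance

-- ===== CLAIM (what is proved, stated in full; the proofs are below) =====
def Claim_equal_llenarMatriz : Prop := ∀ (inicial : Int) (lapso : Int) (remplazoI : Int) (remplazoF : Int) (ano : Int) (matriz : List (List Int)), Dom_llenarMatriz inicial lapso remplazoI remplazoF ano matriz → Pre_llenarMatriz inicial lapso remplazoI remplazoF ano matriz → Spec_llenarMatriz inicial lapso remplazoI remplazoF ano matriz (llenarMatriz inicial lapso remplazoI remplazoF ano matriz)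

-- ===== LEMMAS AND PROOFS =====

-- One-step unfolding of A's recursion, in terms of the wrapper itself.
theorem A_unfold (inicial lapso remplazoI remplazoF ano : Int) (m : List (List Int))
    (h : ano < lapso) :
    llenarMatriz inicial lapso remplazoI remplazoF ano m =
      (fun m1 =>
      if ano = lapso - 1 then m1
      else if remplazoF < inicial then llenarMatriz 1 lapso remplazoI remplazoF (ano + 1) m1
      else if remplazoI ≤ inicial ∧ inicial ≤ remplazoF then
        llenarMatriz 1 lapso remplazoI remplazoF (ano + 1)
          (llenarMatriz (inicial + 1) lapso remplazoI remplazoF (ano + 1) m1)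
      else if inicial < remplazoI then llenarMatriz (inicial + 1) lapso remplazoI remplazoF (ano + 1) m1
      else m1) (appendRow m ano inicial) := by
  have hk : (lapso - ano).toNat = (lapso - (ano + 1)).toNat + 1 := by omega
  simp only [llenarMatriz, hk, llenarFuelA]

-- The cost (node-count bound) of one stack frame at year a.
def frameCost (lapso a : Int) : Nat := 2 ^ (lapso - a).toNat - 1

-- Main invariant: with enough fuel, B's stack loop computes the left fold of A over the stack.
theorem loop_eq (lapso remplazoI remplazoF : Int) :
    ∀ (f : Nat) (stack : List (Int × Int)) (m : List (List Int)),
      (∀ p ∈ stack, p.2 < lapso) →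
      (stack.map (fun p => frameCost lapso p.2)).sum ≤ f →
      llenarLoop lapso remplazoI remplazoF f stack m =
        stack.foldl (fun m p => llenarMatriz p.1 lapso remplazoI remplazoF p.2 m) m := by
  intro f
  induction f with
  | zero =>
    intro stack m hlt hsum
    cases stack with
    | nil => simp [llenarLoop]
    | cons p rest =>
      exfalso
      have h1 : p.2 < lapso := hlt p (List.mem_cons_self ..)
      have : 1 ≤ frameCost lapso p.2 := by
        have : 1 ≤ (lapso - p.2).toNat := by omega
        have h2 : (2:Nat) ^ 1 ≤ 2 ^ (lapso - p.2).toNat := Nat.pow_le_pow_right (by omega) this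
        simp [frameCost]; omega
      simp [List.map_cons, List.sum_cons] at hsum
      omega
  | succ f ih =>
    intro stack m hlt hsum
    cases stack with
    | nil => simp [llenarLoop]
    | cons p rest =>
      obtain ⟨val, a⟩ := p
      have ha : a < lapso := hlt (val, a) (List.mem_cons_self ..)
      have hrest : ∀ p ∈ rest, p.2 < lapso := fun p hp => hlt p (List.mem_cons_of_mem _ hp)
      have hsum' : frameCost lapso a + (rest.map (fun p => frameCost lapso p.2)).sum ≤ f + 1 := by
        simpa [List.map_cons, List.sum_cons] using hsum
      have hc1 : 1 ≤ frameCost lapso a := by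
        have h1 : 1 ≤ (lapso - a).toNat := by omega
        have h2 : (2:Nat) ^ 1 ≤ 2 ^ (lapso - a).toNat := Nat.pow_le_pow_right (by omega) h1
        simp [frameCost]; omega
      simp only [llenarLoop, List.foldl_cons]
      rw [A_unfold val lapso remplazoI remplazoF a m ha]
      simp only []
      by_cases hleaf : a = lapso - 1
      · simp only [hleaf, if_true]
        exact ih rest _ hrest (by omega)
      · -- internal node: a < lapso - 1, so children at a+1 are < lapso and cheaper
        have ha1 : a + 1 < lapso := by omega
        have hcost : frameCost lapso (a + 1) + frameCost lapso (a + 1) + 1 ≤ frameCost lapso a := by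
          have hk : (lapso - a).toNat = (lapso - (a + 1)).toNat + 1 := by omega
          have h1 : 1 ≤ (lapso - (a + 1)).toNat := by omega
          have h2 : (2:Nat) ^ 1 ≤ 2 ^ (lapso - (a + 1)).toNat := Nat.pow_le_pow_right (by omega) h1
          simp only [frameCost, hk, pow_succ]
          omega
        have hmem1' : ∀ (w : Int), ∀ p ∈ ((w, a + 1) :: rest), p.2 < lapso := by
          intro w p hp
          rcases List.mem_cons.mp hp with h | h
          · simp only [h]; omega
          · exact hrest p h
        simp only [if_neg hleaf]
        by_cases h1 : remplazoF < val
        · simp only [if_pos h1]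
          rw [ih ((1, a + 1) :: rest) _ (hmem1' 1) (by simp [List.map_cons, List.sum_cons]; omega)]
          simp [List.foldl_cons]
        · simp only [if_neg h1]
          by_cases h2 : remplazoI ≤ val ∧ val ≤ remplazoF
          · simp only [if_pos h2]
            have hmem2' : ∀ p ∈ ((val + 1, a + 1) :: (1, a + 1) :: rest), p.2 < lapso := by
              intro p hp
              rcases List.mem_cons.mp hp with h | h
              · simp only [h]; omega
              · exact hmem1' 1 p h
            rw [ih ((val + 1, a + 1) :: (1, a + 1) :: rest) _ hmem2'
                (by simp [List.map_cons, List.sum_cons]; omega)]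
            simp [List.foldl_cons]
          · simp only [if_neg h2]
            by_cases h3 : val < remplazoI
            · simp only [if_pos h3]
              rw [ih ((val + 1, a + 1) :: rest) _ (hmem1' (val + 1))
                  (by simp [List.map_cons, List.sum_cons]; omega)]
              simp [List.foldl_cons]
            · simp only [if_neg h3]
              exact ih rest _ hrest (by omega)

-- ===== VERDICT (by name: the statement is the Claim_ definition above) =====
theorem llenarMatriz_spec : Claim_equal_llenarMatriz := by
  intro inicial lapso remplazoI remplazoF ano matriz _ hpre
  obtain ⟨_, hal, _⟩ := hpre
  unfold Spec_llenarMatriz llenarMatriz_alt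
  rw [loop_eq lapso remplazoI remplazoF _ [(inicial, ano)] matriz
      (by intro p hp; simp at hp; simp [hp]; omega)
      (by simp [frameCost]
          have : 2 ^ (lapso - ano).toNat ≤ 2 ^ ((lapso - ano).toNat + 1) :=
            Nat.pow_le_pow_right (by omega) (by omega)
          omega)]
  simp [List.foldl_cons]
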